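-- pv_equiv track=rewrite | github.com/Creeper0809/PCFGCracking | lib_training/detectors/korean_detection.py | _split_hangul_prefixes
-- ===== SOURCE A (Python) =====
-- from typing import List, Tuple, Optional
--
-- _initial_map = {
--     'r':0, 's':2, 'e':3, 'f':5, 'a':6, 'q':7, 't':9, 'd':11,
--     'w':12, 'c':14, 'z':15, 'x':16, 'v':17, 'g':18
-- }
--
-- _medial_map = {
--     'k':0, 'o':1, 'i':2, 'j':4, 'p':5, 'u':6,
--     'h':8, 'y':12, 'n':13, 'b':17, 'm':18, 'l':20
-- }
--
-- _vowel_combine = {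
--     ('h','k'):9, ('h','o'):10, ('h','l'):11,
--     ('n','j'):14, ('n','p'):15, ('n','l'):16,
--     ('m','l'):19
-- }
--
-- _final_map = {
--     'r':1, 's':4, 'e':7, 'f':8, 'a':16, 'q':17,
--     't':19, 'd':21, 'w':22, 'c':23, 'z':24,
--     'x':25, 'v':26, 'g':27
-- }
--
-- def _can_parse_hangul(s: str) -> bool:
--     i, n = 0, len(s)
--     while i < n:
--         if s[i] not in _initial_map:
--             return False
--         i += 1
--         if i < n:
--             if i+1 < n and (s[i], s[i+1]) in _vowel_combine:
--                 i += 2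
--             elif s[i] in _medial_map:
--                 i += 1
--             else:
--                 return False
--         else:
--             return False
--
--         if i < n and s[i] in _final_map:
--             nxt = s[i]
--             if i+1 < n and (
--                 s[i+1] in _medial_map or
--                 (i+2 < n and (s[i+1], s[i+2]) in _vowel_combine)
--             ):
--                 pass
--             else:
--                 i += 1
--
--     return True
--
-- def _split_hangul_prefixes(text: str) -> List[Tuple[str, Optional[str]]]:
--     res: List[Tuple[str, Optional[str]]] = []
--     lower_text = text.lower()
--     i, n = 0, len(text)
--
--     while i < n:
--         found = False
--         for j in range(n, i, -1):
--             if _can_parse_hangul(lower_text[i:j]):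
--                 res.append((text[i:j], f"H{j-i}"))
--                 i = j
--                 found = True
--                 break
--         if found:
--             continue
--         k = i + 1
--         while k < n:
--             if any(_can_parse_hangul(lower_text[k:m]) for m in range(n, k, -1)):
--                 break
--             k += 1
--         res.append((text[i:k], None))
--         i = k
--
--     return res
-- ===== SOURCE B (Python) =====
-- from typing import List, Tuple, Optional
--
-- _initial_map = {
--     'r':0, 's':2, 'e':3, 'f':5, 'a':6, 'q':7, 't':9, 'd':11,
--     'w':12, 'c':14, 'z':15, 'x':16, 'v':17, 'g':18
-- }
--
-- _medial_map = {
--     'k':0, 'o':1, 'i':2, 'j':4, 'p':5, 'u':6,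
--     'h':8, 'y':12, 'n':13, 'b':17, 'm':18, 'l':20
-- }
--
-- _vowel_combine = {
--     ('h','k'):9, ('h','o'):10, ('h','l'):11,
--     ('n','j'):14, ('n','p'):15, ('n','l'):16,
--     ('m','l'):19
-- }
--
-- _final_map = {
--     'r':1, 's':4, 'e':7, 'f':8, 'a':16, 'q':17,
--     't':19, 'd':21, 'w':22, 'c':23, 'z':24,
--     'x':25, 'v':26, 'g':27
-- }
--
-- def _final_adjust(s: str, q: int, j: int) -> int:
--     """Consume a final consonant at q in s[:j] unless it must start the next syllable."""
--     if q < j and s[q] in _final_map: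
--         if q + 1 < j and (
--             s[q+1] in _medial_map or
--             (q + 2 < j and (s[q+1], s[q+2]) in _vowel_combine)
--         ):
--             return q
--         return q + 1
--     return q
--
-- def _syllable_end(s: str, p: int, j: int) -> Optional[int]:
--     """End index after one syllable parsed from p in s[:j], or None.
--     Mirrors one iteration of the deterministic romanization parser with end j."""
--     if s[p] not in _initial_map:
--         return None
--     q = p + 1
--     if q >= j:
--         return None
--     if q + 1 < j and (s[q], s[q+1]) in _vowel_combine:
--         q += 2
--     elif s[q] in _medial_map:
--         q += 1
--     else:
--         return None
--     return _final_adjust(s, q, j)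
--
-- def _split_hangul_prefixes(text: str) -> List[Tuple[str, Optional[str]]]:
--     lower = text.lower()
--     n = len(text)
--     # best[p] = largest j (p < j <= n) with lower[p:j] hangul-parseable, or None.
--     # For each end j, fill reachability backward: good[p] iff the deterministic
--     # parser of lower[p:j] consumes everything; one syllable step per cell.
--     best: List[Optional[int]] = [None] * n
--     for j in range(1, n + 1):
--         good = [False] * (j + 1)
--         good[j] = True
--         for p in range(j - 1, -1, -1):
--             q = _syllable_end(lower, p, j)
--             if q is not None and good[q]:
--                 good[p] = True
--                 best[p] = j
--     res: List[Tuple[str, Optional[str]]] = []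
--     i = 0
--     while i < n:
--         j = best[i]
--         if j is not None:
--             res.append((text[i:j], f"H{j-i}"))
--             i = j
--         else:
--             k = i + 1
--             while k < n and best[k] is None:
--                 k += 1
--             res.append((text[i:k], None))
--             i = k
--     return res
-- ===== Notes on version B (the rewrite author's own statement) =====
-- stated objective: faster
-- what changed: A re-parses every substring from scratch (and re-scans all of them again inside the unparseable-run search); B precomputes, for every end j, deterministic-parser syllable-boundary reachability backward in one pass, yielding a best-parseable-end table that the split loop and run search just look up.
import Mathlib
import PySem

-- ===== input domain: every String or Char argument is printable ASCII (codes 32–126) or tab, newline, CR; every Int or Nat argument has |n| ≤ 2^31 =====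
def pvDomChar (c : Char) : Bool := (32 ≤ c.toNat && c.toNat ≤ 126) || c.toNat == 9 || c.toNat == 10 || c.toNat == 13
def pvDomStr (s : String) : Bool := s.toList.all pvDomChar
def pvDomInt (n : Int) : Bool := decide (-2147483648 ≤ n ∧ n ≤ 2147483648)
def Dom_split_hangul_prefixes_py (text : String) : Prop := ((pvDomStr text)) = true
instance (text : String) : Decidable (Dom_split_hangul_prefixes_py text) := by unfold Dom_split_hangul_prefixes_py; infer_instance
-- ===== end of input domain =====

-- B replaces A's O(n^3) re-parsing of every substring by an O(n^2) backward reachability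
-- table (largest parseable end for every start), computed once; same return value.

-- shared module constants (the four romanization dicts of the Python module; values unused, membership only)
def hangulInitialMap : PySem.Dict Char Int := PySem.Dict.ofList
  [('r',0),('s',2),('e',3),('f',5),('a',6),('q',7),('t',9),('d',11),
   ('w',12),('c',14),('z',15),('x',16),('v',17),('g',18)]
def hangulMedialMap : PySem.Dict Char Int := PySem.Dict.ofList
  [('k',0),('o',1),('i',2),('j',4),('p',5),('u',6),
   ('h',8),('y',12),('n',13),('b',17),('m',18),('l',20)]
def hangulVowelCombine : PySem.Dict (Char × Char) Int := PySem.Dict.ofList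
  [(('h','k'),9),(('h','o'),10),(('h','l'),11),
   (('n','j'),14),(('n','p'),15),(('n','l'),16),(('m','l'),19)]
def hangulFinalMap : PySem.Dict Char Int := PySem.Dict.ofList
  [('r',1),('s',4),('e',7),('f',8),('a',16),('q',17),
   ('t',19),('d',21),('w',22),('c',23),('z',24),('x',25),('v',26),('g',27)]

def isInit (c : Char) : Bool := PySem.Dict.contains hangulInitialMap c
def isMed (c : Char) : Bool := PySem.Dict.contains hangulMedialMap c
def isComb (c d : Char) : Bool := PySem.Dict.contains hangulVowelCombine (c, d)
def isFin (c : Char) : Bool := PySem.Dict.contains hangulFinalMap c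

-- ===== PORT A =====
-- _can_parse_hangul's while loop; indices are the Python ints (always ≥ 0 and in
-- range where dereferenced, so Nat + List.getD is exact here).
-- final-consonant adjustment (the tail of one iteration of the while loop)
def finStep (s : List Char) (q : Nat) : Nat :=
  if q < s.length && isFin (s.getD q ' ') then
    if q + 1 < s.length &&
        (isMed (s.getD (q+1) ' ') ||
         (q + 2 < s.length && isComb (s.getD (q+1) ' ') (s.getD (q+2) ' '))) then q
    else q + 1
  else q

theorem le_finStep (s : List Char) (q : Nat) : q ≤ finStep s q := by
  unfold finStep; split_ifs <;> omega

def canParseAux (s : List Char) (i : Nat) : Bool :=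
  if _h : i < s.length then
    if !(isInit (s.getD i ' ')) then false
    else if i + 1 < s.length then
      -- medial step (vowel-combine first, as in the Python), then optional final
      if i + 2 < s.length && isComb (s.getD (i+1) ' ') (s.getD (i+2) ' ') then
        canParseAux s (finStep s (i+3))
      else if isMed (s.getD (i+1) ' ') then
        canParseAux s (finStep s (i+2))
      else false
    else false
  else true
  termination_by s.length - i
  decreasing_by
    · have := le_finStep s (i+3); omega
    · have := le_finStep s (i+2); omega

def canParseHangul (s : List Char) : Bool := canParseAux s 0

-- for j in range(n, i, -1): first (largest) j with lower[i:j] parseable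
def findJ (lower : List Char) (i : Nat) : Nat → Option Nat
  | 0 => none
  | j+1 =>
    if i ≤ j then
      if canParseHangul (PySem.List.slice lower (some (i : Int)) (some ((j+1 : Nat) : Int))) then some (j+1)
      else findJ lower i j
    else none

-- any(_can_parse_hangul(lower_text[k:m]) for m in range(n, k, -1))
def anyParse (lower : List Char) (k n : Nat) : Bool :=
  (PySem.List.pyRange (n : Int) (k : Int) (-1)).any
    (fun m => canParseHangul (PySem.List.slice lower (some (k : Int)) (some m)))

-- inner while k < n loop
def kScanA (lower : List Char) (n : Nat) : Nat → Nat → Nat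
  | 0, k => k
  | fuel+1, k =>
    if k < n then
      if anyParse lower k n then k else kScanA lower n fuel (k+1)
    else k

-- main while i < n loop (fuel = n: i strictly increases each iteration)
def mainLoopA (cs lower : List Char) : Nat → Nat → List (String × Option String)
  | 0, _ => []
  | fuel+1, i =>
    if i < cs.length then
      match findJ lower i cs.length with
      | some j =>
        (String.ofList (PySem.List.slice cs (some (i : Int)) (some (j : Int))),
         some (String.ofList ('H' :: PySem.Int.toChars ((j : Int) - (i : Int))))) ::
          mainLoopA cs lower fuel j
      | none =>
        let k := kScanA lower cs.length cs.length (i+1)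
        (String.ofList (PySem.List.slice cs (some (i : Int)) (some (k : Int))), none) ::
          mainLoopA cs lower fuel k
    else []

def split_hangul_prefixes_py (text : String) : List (String × Option String) :=
  let cs := text.toList
  let lower := PySem.Chars.lower cs
  mainLoopA cs lower cs.length 0

-- ===== PORT B =====
-- _final_adjust: consume a final consonant at q in s[:j] unless a medial follows
def finStepG (s : List Char) (q j : Nat) : Nat :=
  if q < j && isFin (s.getD q ' ') then
    if q + 1 < j &&
        (isMed (s.getD (q+1) ' ') ||
         (q + 2 < j && isComb (s.getD (q+1) ' ') (s.getD (q+2) ' '))) then q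
    else q + 1
  else q

-- _syllable_end: one deterministic syllable step from p in s[:j]
def syllEnd (s : List Char) (p j : Nat) : Option Nat :=
  if !(isInit (s.getD p ' ')) then none
  else if p + 1 < j then
    if p + 2 < j && isComb (s.getD (p+1) ' ') (s.getD (p+2) ' ') then some (finStepG s (p+3) j)
    else if isMed (s.getD (p+1) ' ') then some (finStepG s (p+2) j)
    else none
  else none

-- for p in range(j-1, -1, -1): fill good[p], update best[p]; p is "next index + 1"
def fillLoop (s : List Char) (j : Nat) : Nat → List Bool → List (Option Nat) → List Bool × List (Option Nat)
  | 0, good, best => (good, best)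
  | p+1, good, best =>
    match syllEnd s p j with
    | some q =>
      if good.getD q false then fillLoop s j p (good.set p true) (best.set p (some j))
      else fillLoop s j p good best
    | none => fillLoop s j p good best

-- for j in range(1, n+1)
def bestLoop (s : List Char) (n : Nat) : Nat → List (Option Nat) → List (Option Nat)
  | 0, best => best
  | left+1, best =>
    let j := n - left
    let good := (List.replicate (j+1) false).set j true
    bestLoop s n left (fillLoop s j j good best).2

-- while k < n and best[k] is None
def kScanB (best : List (Option Nat)) (n : Nat) : Nat → Nat → Nat
  | 0, k => k
  | fuel+1, k =>
    if k < n then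
      if (best.getD k none).isSome then k else kScanB best n fuel (k+1)
    else k

-- final while i < n loop reading the table
def buildB (cs : List Char) (best : List (Option Nat)) : Nat → Nat → List (String × Option String)
  | 0, _ => []
  | fuel+1, i =>
    if i < cs.length then
      match best.getD i none with
      | some j =>
        (String.ofList (PySem.List.slice cs (some (i : Int)) (some (j : Int))),
         some (String.ofList ('H' :: PySem.Int.toChars ((j : Int) - (i : Int))))) ::
          buildB cs best fuel j
      | none =>
        let k := kScanB best cs.length cs.length (i+1)
        (String.ofList (PySem.List.slice cs (some (i : Int)) (some (k : Int))), none) ::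
          buildB cs best fuel k
    else []

def split_hangul_prefixes_py_alt (text : String) : List (String × Option String) :=
  let cs := text.toList
  let lower := PySem.Chars.lower cs
  let best := bestLoop lower cs.length cs.length (List.replicate cs.length none)
  buildB cs best cs.length 0

-- ===== PRECONDITION & SPEC =====
def Spec_split_hangul_prefixes_py (text : String) (out : List (String × Option String)) : Prop := out = split_hangul_prefixes_py_alt text
instance (text : String) (out : List (String × Option String)) : Decidable (Spec_split_hangul_prefixes_py text out) := by unfold Spec_split_hangul_prefixes_py; infer_instance

-- ===== CLAIM (what is proved, stated in full; the proofs are below) =====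
def Claim_equal_split_hangul_prefixes_py : Prop := ∀ (text : String), Dom_split_hangul_prefixes_py text → Spec_split_hangul_prefixes_py text (split_hangul_prefixes_py text)

-- ===== LEMMAS AND PROOFS =====

-- proof-side helpers: the syllable step of A's parser, extracted, and reachability specs

def syllA (sub : List Char) (t : Nat) : Option Nat :=
  if !(isInit (sub.getD t ' ')) then none
  else if t + 1 < sub.length then
    if t + 2 < sub.length && isComb (sub.getD (t+1) ' ') (sub.getD (t+2) ' ') then some (finStep sub (t+3))
    else if isMed (sub.getD (t+1) ' ') then some (finStep sub (t+2))
    else none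
  else none

theorem le_finStepG (s : List Char) (v j : Nat) : v ≤ finStepG s v j := by
  unfold finStepG; split_ifs <;> omega

theorem finStepG_le (s : List Char) (v j : Nat) (h : v ≤ j) : finStepG s v j ≤ j := by
  unfold finStepG; split_ifs with h1 h2 <;> simp_all <;> omega

theorem syllEnd_bounds {s : List Char} {p j q : Nat} (h : syllEnd s p j = some q) :
    p + 2 ≤ q ∧ q ≤ j := by
  unfold syllEnd at h
  split_ifs at h with h1 h2 h3 h4 <;>
    first
      | (injection h with h; subst h
         simp only [Bool.and_eq_true, decide_eq_true_eq] at h3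
         first
           | exact ⟨by have := le_finStepG s (p+3) j; omega,
                    finStepG_le s (p+3) j (by omega)⟩
           | exact ⟨by have := le_finStepG s (p+2) j; omega,
                    finStepG_le s (p+2) j (by omega)⟩)
      | exact absurd h (by simp)

def reachAF (sub : List Char) : Nat → Nat → Bool
  | 0, t => decide (sub.length ≤ t)
  | f+1, t =>
    if t < sub.length then
      match syllA sub t with
      | some u => reachAF sub f u
      | none => false
    else true

def reachGF (s : List Char) (j : Nat) : Nat → Nat → Bool
  | 0, p => decide (j ≤ p)
  | f+1, p =>
    if p < j then
      match syllEnd s p j with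
      | some q => reachGF s j f q
      | none => false
    else true

theorem reachGF_congr {s : List Char} {j : Nat} :
    ∀ f f' p, j - p ≤ f → j - p ≤ f' → reachGF s j f p = reachGF s j f' p := by
  intro f
  induction f with
  | zero =>
    intro f' p hf hf'
    cases f' with
    | zero => rfl
    | succ f' =>
      have hp : j ≤ p := by omega
      simp only [reachGF, if_neg (by omega : ¬ p < j)]
      exact decide_eq_true hp
  | succ f ih =>
    intro f' p hf hf'
    cases f' with
    | zero =>
      have hp : j ≤ p := by omega
      simp only [reachGF, if_neg (by omega : ¬ p < j)]
      exact (decide_eq_true hp).symm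
    | succ f' =>
      simp only [reachGF]
      by_cases hp : p < j
      · rw [if_pos hp, if_pos hp]
        cases hsy : syllEnd s p j with
        | none => rfl
        | some q =>
          have hb := syllEnd_bounds hsy
          exact ih f' q (by omega) (by omega)
      · rw [if_neg hp, if_neg hp]

def reachG (s : List Char) (j p : Nat) : Bool := reachGF s j (j - p) p

theorem reachG_unfold {s : List Char} {j p : Nat} :
    reachG s j p
      = if p < j then
          match syllEnd s p j with
          | some q => reachG s j q
          | none => false
        else true := by
  unfold reachG
  by_cases hp : p < j
  · have : j - p = (j - p - 1) + 1 := by omega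
    rw [this]
    simp only [reachGF, if_pos hp]
    cases hsy : syllEnd s p j with
    | none => rfl
    | some q =>
      have hb := syllEnd_bounds hsy
      exact reachGF_congr _ _ q (by omega) (by omega)
  · cases hjp : j - p with
    | zero => simp only [reachGF, if_neg hp, decide_eq_true_eq]; omega
    | succ f => simp only [reachGF, if_neg hp]

theorem canParseAux_eq_reachAF (sub : List Char) :
    ∀ f t, sub.length - t ≤ f → canParseAux sub t = reachAF sub f t := by
  intro f
  induction f with
  | zero =>
    intro t ht
    rw [canParseAux, dif_neg (by omega)]
    simp only [reachAF]
    exact (decide_eq_true (by omega : sub.length ≤ t)).symm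
  | succ f ih =>
    intro t ht
    rw [canParseAux]
    simp only [reachAF]
    by_cases h0 : t < sub.length
    · rw [dif_pos h0, if_pos h0]
      unfold syllA
      by_cases h1 : (!(isInit (sub.getD t ' '))) = true
      · rw [if_pos h1, if_pos h1]
      · rw [if_neg h1, if_neg h1]
        by_cases h2 : t + 1 < sub.length
        · rw [if_pos h2, if_pos h2]
          by_cases h3 : (decide (t + 2 < sub.length) && isComb (sub.getD (t+1) ' ') (sub.getD (t+2) ' ')) = true
          · rw [if_pos h3, if_pos h3]
            exact ih _ (by have := le_finStep sub (t+3); omega)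
          · rw [if_neg h3, if_neg h3]
            by_cases h4 : isMed (sub.getD (t+1) ' ') = true
            · rw [if_pos h4, if_pos h4]
              exact ih _ (by have := le_finStep sub (t+2); omega)
            · rw [if_neg h4, if_neg h4]
        · rw [if_neg h2, if_neg h2]
    · rw [dif_neg h0, if_neg h0]

theorem slice_getD {s : List Char} {i j t : Nat} (ht : i + t < j) (hj : j ≤ s.length) :
    (PySem.List.slice s (some (i : Int)) (some (j : Int))).getD t ' ' = s.getD (i + t) ' ' := by
  rw [PySem.List.slice_natCast]
  rw [List.getD_eq_getElem?_getD, List.getD_eq_getElem?_getD,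
      List.getElem?_take_of_lt (by omega), List.getElem?_drop]

theorem slice_len {s : List Char} {i j : Nat} (hij : i ≤ j) (hj : j ≤ s.length) :
    (PySem.List.slice s (some (i : Int)) (some (j : Int))).length = j - i := by
  rw [PySem.List.slice_natCast]; simp; omega

theorem finStep_slice {s : List Char} {i j : Nat} (u : Nat) (hij : i ≤ j) (hj : j ≤ s.length) :
    i + finStep (PySem.List.slice s (some (i : Int)) (some (j : Int))) u = finStepG s (i + u) j := by
  unfold finStep finStepG
  rw [slice_len hij hj]
  simp only [Nat.add_assoc]
  by_cases c1 : i + u < j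
  · rw [slice_getD (t := u) (by omega) hj]
    simp only [show (u < j - i) = True from eq_true (by omega),
               show (i + u < j) = True from eq_true c1, decide_true, Bool.true_and]
    cases c2 : isFin (s.getD (i + u) ' ') with
    | false => rw [if_neg Bool.false_ne_true, if_neg Bool.false_ne_true]
    | true =>
      rw [if_pos rfl, if_pos rfl]
      by_cases c3 : i + (u + 1) < j
      · rw [slice_getD (t := u+1) (by omega) hj]
        simp only [show (u + 1 < j - i) = True from eq_true (by omega),
                   show (i + (u + 1) < j) = True from eq_true c3, decide_true, Bool.true_and]
        cases c4 : isMed (s.getD (i + (u + 1)) ' ') with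
        | true => rw [Bool.true_or, Bool.true_or, if_pos rfl, if_pos rfl]
        | false =>
          rw [Bool.false_or, Bool.false_or]
          by_cases c5 : i + (u + 2) < j
          · rw [slice_getD (t := u+2) (by omega) hj]
            simp only [show (u + 2 < j - i) = True from eq_true (by omega),
                       show (i + (u + 2) < j) = True from eq_true c5, decide_true, Bool.true_and]
            cases c6 : isComb (s.getD (i + (u + 1)) ' ') (s.getD (i + (u + 2)) ' ') with
            | true => rw [if_pos rfl, if_pos rfl]
            | false => rw [if_neg Bool.false_ne_true, if_neg Bool.false_ne_true]
          · simp only [show (u + 2 < j - i) = False from eq_false (by omega),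
                       show (i + (u + 2) < j) = False from eq_false c5, decide_false, Bool.false_and]
            rw [if_neg Bool.false_ne_true, if_neg Bool.false_ne_true]
      · simp only [show (u + 1 < j - i) = False from eq_false (by omega),
                   show (i + (u + 1) < j) = False from eq_false c3, decide_false, Bool.false_and]
        rw [if_neg Bool.false_ne_true, if_neg Bool.false_ne_true]
  · simp only [show (u < j - i) = False from eq_false (by omega),
               show (i + u < j) = False from eq_false c1, decide_false, Bool.false_and]
    rw [if_neg Bool.false_ne_true, if_neg Bool.false_ne_true]

theorem syllEnd_slice {s : List Char} {i j t : Nat} (hj : j ≤ s.length) (ht : i + t < j) :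
    syllEnd s (i + t) j
      = (syllA (PySem.List.slice s (some (i : Int)) (some (j : Int))) t).map (fun u => i + u) := by
  unfold syllEnd syllA
  rw [slice_len (by omega) hj, slice_getD (t := t) ht hj]
  simp only [Nat.add_assoc]
  by_cases h1 : (!(isInit (s.getD (i + t) ' '))) = true
  · rw [if_pos h1, if_pos h1]; rfl
  · rw [if_neg h1, if_neg h1]
    by_cases h2 : i + (t + 1) < j
    · rw [slice_getD (t := t+1) (by omega) hj,
          if_pos (show i + (t + 1) < j from h2), if_pos (show t + 1 < j - i by omega)]
      by_cases h3 : i + (t + 2) < j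
      · rw [slice_getD (t := t+2) (by omega) hj]
        simp only [show (t + 2 < j - i) = True from eq_true (by omega),
                   show (i + (t + 2) < j) = True from eq_true h3, decide_true, Bool.true_and]
        by_cases h4 : isComb (s.getD (i + (t + 1)) ' ') (s.getD (i + (t + 2)) ' ') = true
        · rw [if_pos h4, if_pos h4, Option.map_some]
          exact congrArg some (finStep_slice (t+3) (by omega) hj).symm
        · rw [if_neg h4, if_neg h4]
          by_cases h5 : isMed (s.getD (i + (t + 1)) ' ') = true
          · rw [if_pos h5, if_pos h5, Option.map_some]
            exact congrArg some (finStep_slice (t+2) (by omega) hj).symm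
          · rw [if_neg h5, if_neg h5]; rfl
      · simp only [show (t + 2 < j - i) = False from eq_false (by omega),
                   show (i + (t + 2) < j) = False from eq_false h3, decide_false, Bool.false_and,
                   Bool.false_eq_true, if_false]
        by_cases h5 : isMed (s.getD (i + (t + 1)) ' ') = true
        · rw [if_pos h5, if_pos h5, Option.map_some]
          exact congrArg some (finStep_slice (t+2) (by omega) hj).symm
        · rw [if_neg h5, if_neg h5]; rfl
    · rw [if_neg (show ¬ i + (t + 1) < j from h2), if_neg (show ¬ t + 1 < j - i by omega)]; rfl

theorem reachAF_slice {s : List Char} {i j : Nat} (hij : i ≤ j) (hj : j ≤ s.length) :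
    ∀ f t, reachAF (PySem.List.slice s (some (i : Int)) (some (j : Int))) f t
            = reachGF s j f (i + t) := by
  intro f
  induction f with
  | zero =>
    intro t
    simp only [reachAF, reachGF, slice_len hij hj, decide_eq_decide]
    omega
  | succ f ih =>
    intro t
    simp only [reachAF, reachGF, slice_len hij hj]
    by_cases h0 : i + t < j
    · rw [if_pos (show t < j - i by omega), if_pos h0, syllEnd_slice hj h0]
      cases hsy : syllA (PySem.List.slice s (some (i : Int)) (some (j : Int))) t with
      | none => rfl
      | some u => exact ih u
    · rw [if_neg (show ¬ t < j - i by omega), if_neg h0]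

theorem canParse_slice {s : List Char} {i j : Nat} (hij : i ≤ j) (hj : j ≤ s.length) :
    canParseHangul (PySem.List.slice s (some (i : Int)) (some (j : Int))) = reachG s j i := by
  unfold canParseHangul reachG
  rw [canParseAux_eq_reachAF _ (j - i) 0 (by simp [slice_len hij hj])]
  exact reachAF_slice hij hj (j - i) 0

def bestSpec (s : List Char) (t : Nat) : Nat → Option Nat
  | 0 => none
  | J+1 => if t ≤ J then (if reachG s (J+1) t then some (J+1) else bestSpec s t J) else none

theorem bestSpec_none {s : List Char} {t : Nat} : ∀ J, J ≤ t → bestSpec s t J = none := by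
  intro J; induction J with
  | zero => intro _; rfl
  | succ J ih => intro h; unfold bestSpec; rw [if_neg (by omega)]

theorem findJ_eq {s : List Char} {i : Nat} : ∀ j, j ≤ s.length → findJ s i j = bestSpec s i j := by
  intro j; induction j with
  | zero => intro _; rfl
  | succ j ih =>
    intro hj
    unfold findJ bestSpec
    by_cases hij : i ≤ j
    · rw [if_pos hij, if_pos hij, canParse_slice (by omega) hj, ih (by omega)]
    · rw [if_neg hij, if_neg hij]

theorem cond_shift {s : List Char} {j c t : Nat} (hrc : reachG s j c = false)
    (x : Option Nat) (y : Option Nat) :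
    (if t < c ∧ reachG s j t = true then x else y)
      = (if t < c + 1 ∧ reachG s j t = true then x else y) := by
  by_cases hr : reachG s j t = true
  · by_cases htc : t < c
    · rw [if_pos ⟨htc, hr⟩, if_pos ⟨by omega, hr⟩]
    · rw [if_neg (fun h => htc h.1), if_neg ?_]
      rintro ⟨h1, h2⟩
      have e : t = c := by omega
      rw [e, hrc] at h2
      exact Bool.false_ne_true h2
  · rw [if_neg (fun h => hr h.2), if_neg (fun h => hr h.2)]

theorem anyParse_eq {s : List Char} {k : Nat} : ∀ n, anyParse s k n = (findJ s k n).isSome := by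
  intro n
  induction n with
  | zero =>
    unfold anyParse
    rw [PySem.List.pyRange_neg_one_eq_nil (by exact_mod_cast Nat.zero_le k)]
    rfl
  | succ n ih =>
    by_cases hk : k ≤ n
    · unfold anyParse
      rw [PySem.List.pyRange_neg_one_cons (by exact_mod_cast Nat.lt_succ_of_le hk),
          List.any_cons,
          show ((n + 1 : Nat) : Int) - 1 = ((n : Nat) : Int) by push_cast; ring]
      unfold anyParse at ih
      rw [ih]
      simp only [findJ, if_pos hk]
      cases hc : canParseHangul (PySem.List.slice s (some (k : Int)) (some ((n + 1 : Nat) : Int))) with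
      | true => rw [Bool.true_or]; rfl
      | false => rw [Bool.false_or, if_neg Bool.false_ne_true]
    · unfold anyParse
      rw [PySem.List.pyRange_neg_one_eq_nil (by exact_mod_cast (by omega : n + 1 ≤ k))]
      simp only [findJ, if_neg hk]
      rfl

theorem kScan_eq {lower : List Char} {best : List (Option Nat)} {n : Nat}
    (hn : n ≤ lower.length) (hb : ∀ t, best.getD t none = bestSpec lower t n) :
    ∀ fuel k, kScanA lower n fuel k = kScanB best n fuel k := by
  intro fuel; induction fuel with
  | zero => intro k; rfl
  | succ fuel ih =>
    intro k
    unfold kScanA kScanB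
    rw [hb k, ← findJ_eq n hn, ← anyParse_eq]
    by_cases hk : k < n
    · rw [if_pos hk, if_pos hk]; by_cases ha : anyParse lower k n <;> simp [ha, ih]
    · rw [if_neg hk, if_neg hk]

theorem getD_set_bool {l : List Bool} {i t : Nat} {b : Bool} (h : i < l.length) :
    (l.set i b).getD t false = if i = t then b else l.getD t false := by
  simp [List.getD_eq_getElem?_getD, List.getElem?_set, h]
  split_ifs <;> rfl

theorem getD_set_opt {l : List (Option Nat)} {i t : Nat} {v : Option Nat} (h : i < l.length) :
    (l.set i v).getD t none = if i = t then v else l.getD t none := by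
  simp [List.getD_eq_getElem?_getD, List.getElem?_set, h]
  split_ifs <;> rfl

theorem replicate_getD_bool (n t : Nat) : (List.replicate n false).getD t false = false := by
  simp [List.getD_eq_getElem?_getD, List.getElem?_replicate]
  split <;> rfl

theorem fillLoop_best {s : List Char} {j : Nat} :
    ∀ c good best, c ≤ j → good.length = j + 1 → j ≤ best.length →
      (∀ t, t ≤ j → good.getD t false = (if c ≤ t then reachG s j t else false)) →
      (∀ t, (fillLoop s j c good best).2.getD t none
        = if t < c ∧ reachG s j t then some j else best.getD t none) := by
  intro c
  induction c with
  | zero =>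
    intro good best _ _ _ _ t
    simp only [fillLoop]
    rw [if_neg (by omega)]
  | succ c ih =>
    intro good best hc hgl hbl hg t
    simp only [fillLoop]
    split
    case h_2 hsy =>
      have hrc : reachG s j c = false := by rw [reachG_unfold, if_pos (by omega), hsy]
      rw [ih good best (by omega) hgl hbl ?_ t, cond_shift hrc]
      intro t' ht'
      rw [hg t' ht']
      split_ifs with A B
      · rfl
      · omega
      · have e : t' = c := by omega
        rw [e, hrc]
      · rfl
    case h_1 q hsy =>
      have hb := syllEnd_bounds hsy
      have hq : good.getD q false = reachG s j q := by
        rw [hg q (by omega), if_pos (by omega)]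
      have hrc : reachG s j c = reachG s j q := by
        rw [reachG_unfold, if_pos (by omega), hsy]
      cases hrq : reachG s j q with
      | false =>
        rw [hq, hrq, if_neg Bool.false_ne_true]
        have hrc' : reachG s j c = false := by rw [hrc, hrq]
        rw [ih good best (by omega) hgl hbl ?_ t, cond_shift hrc']
        intro t' ht'
        rw [hg t' ht']
        split_ifs with A B
        · rfl
        · omega
        · have e : t' = c := by omega
          rw [e, hrc']
        · rfl
      | true =>
        rw [hq, hrq, if_pos rfl]
        have hrc' : reachG s j c = true := by rw [hrc, hrq]
        rw [ih (good.set c true) (best.set c (some j)) (by omega) (by simpa using hgl)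
              (by simpa using hbl) ?_ t]
        · rw [getD_set_opt (show c < best.length by omega)]
          by_cases hr : reachG s j t = true
          · by_cases htc : t < c
            · rw [if_pos ⟨htc, hr⟩, if_pos ⟨by omega, hr⟩]
            · rw [if_neg (fun h => htc h.1)]
              by_cases e : t = c
              · rw [if_pos (show c = t from e.symm),
                    if_pos (show t < c + 1 ∧ reachG s j t = true from ⟨by omega, hr⟩)]
              · rw [if_neg (show ¬ c = t from fun h => e h.symm),
                    if_neg (show ¬ (t < c + 1 ∧ reachG s j t = true) from by
                      rintro ⟨h1, _⟩; exact e (by omega))]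
          · rw [if_neg (show ¬ (t < c ∧ reachG s j t = true) from fun h => hr h.2),
                if_neg (show ¬ (t < c + 1 ∧ reachG s j t = true) from fun h => hr h.2),
                if_neg (show ¬ c = t from fun h => hr (by rw [← h]; exact hrc'))]
        · intro t' ht'
          rw [getD_set_bool (show c < good.length by omega)]
          by_cases e : c = t'
          · rw [if_pos e, if_pos (by omega), ← e, hrc']
          · rw [if_neg e, hg t' ht']
            split_ifs with A B
            · rfl
            · omega
            · exact absurd (by omega : c = t') e
            · rfl

theorem fillLoop_len {s : List Char} {j : Nat} :
    ∀ c good best, (fillLoop s j c good best).2.length = best.length := by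
  intro c; induction c with
  | zero => intro good best; rfl
  | succ c ih =>
    intro good best
    unfold fillLoop
    cases hsy : syllEnd s c j with
    | none => exact ih _ _
    | some q =>
      by_cases hg : good.getD q false
      · simp only [hg, if_pos]; rw [ih]; simp
      · simp only [hg]; rw [if_neg (by simp)]; exact ih _ _

theorem bestLoop_spec {s : List Char} {n : Nat} :
    ∀ left best, left ≤ n → best.length = n →
      (∀ t, best.getD t none = bestSpec s t (n - left)) →
      (∀ t, (bestLoop s n left best).getD t none = bestSpec s t n) := by
  intro left
  induction left with
  | zero =>
    intro best _ _ hb t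
    simpa using hb t
  | succ left ih =>
    intro best hle hlen hb t
    simp only [bestLoop]
    apply ih
    · omega
    · rw [fillLoop_len]; exact hlen
    · intro t'
      have hgood : ∀ t'', t'' ≤ n - left →
          ((List.replicate ((n - left) + 1) false).set (n - left) true).getD t'' false
            = if (n - left) ≤ t'' then reachG s (n - left) t'' else false := by
        intro t'' ht''
        rw [getD_set_bool (by simp)]
        by_cases e : (n - left) = t''
        · rw [if_pos e, if_pos (by omega), ← e, reachG_unfold, if_neg (by omega)]
        · rw [if_neg e, if_neg (by omega), replicate_getD_bool]
      rw [fillLoop_best (n - left) _ best (le_refl _) (by simp) (by omega) hgood t', hb t']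
      have hJ : n - left = (n - (left + 1)) + 1 := by omega
      rw [hJ]
      simp only [bestSpec]
      by_cases ht' : t' ≤ n - (left + 1)
      · rw [if_pos ht']
        by_cases hr : reachG s (n - (left + 1) + 1) t' = true
        · rw [if_pos ⟨by omega, hr⟩, if_pos hr]
        · rw [if_neg (fun h => hr h.2), if_neg hr]
      · rw [if_neg ht', if_neg (fun h => ht' (by omega)),
            bestSpec_none (n - (left + 1)) (by omega)]

theorem replicate_getD (n t : Nat) : (List.replicate n (none : Option Nat)).getD t none = none := by
  simp [List.getD_eq_getElem?_getD, List.getElem?_replicate]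
  split <;> rfl

theorem main_eq {cs lower : List Char} {best : List (Option Nat)}
    (hlen : lower.length = cs.length)
    (hb : ∀ t, best.getD t none = bestSpec lower t cs.length) :
    ∀ fuel i, mainLoopA cs lower fuel i = buildB cs best fuel i := by
  intro fuel; induction fuel with
  | zero => intro i; rfl
  | succ fuel ih =>
    intro i
    unfold mainLoopA buildB
    rw [hb i, ← findJ_eq cs.length (by omega)]
    by_cases hi : i < cs.length
    · rw [if_pos hi, if_pos hi]
      cases hf : findJ lower i cs.length with
      | some j => simp only [ih]
      | none =>
        rw [kScan_eq (by omega) hb cs.length (i+1)]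
        simp only [ih]
    · rw [if_neg hi, if_neg hi]

-- ===== VERDICT (by name: the statement is the Claim_ definition above) =====
theorem split_hangul_prefixes_py_spec : Claim_equal_split_hangul_prefixes_py := by
  intro text _
  unfold Spec_split_hangul_prefixes_py split_hangul_prefixes_py split_hangul_prefixes_py_alt
  have hlen : (PySem.Chars.lower text.toList).length = text.toList.length := by
    simp [PySem.Chars.lower]
  exact main_eq hlen
    (fun t => bestLoop_spec text.toList.length (List.replicate text.toList.length none)
      (le_refl _) (by simp) (fun t => by simp only [Nat.sub_self, bestSpec, replicate_getD]) t)
    text.toList.length 0
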